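-- pv_equiv track=rewrite | github.com/beshirD/Competitive-Programming | bootcamp/ambigousCoordinates.py | helper
-- ===== SOURCE A (Python) =====
-- def helper(S):
--     result = []
--     if len(S) > 1 and S[0] == '0' and S[-1] == '0':
--         return result
--     if S[0] == '0' and S[-1] != '0':
--         result.append('.'.join([S[0],S[1:]]))
--         return result
--     if S[0] != '0' and S[-1] == '0':
--         result.append(S)
--         return result
--     if len(S) == 1:
--         result.append(S)
--         return result
--     if  S[0] != '0' and S[-1] != '0':
--         result.append(S)
--         for i in range(1,len(S)):
--             res = '.'.join([S[:i],S[i:]])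
--             result.append(res)
--         return result
-- ===== SOURCE B (Python) =====
-- def helper(S):
--     def ok_int(p):
--         return len(p) == 1 or p[0] != '0'
--
--     if len(S) == 1:
--         return [S]
--     out = [S] if ok_int(S) else []
--     left, right = S[0], S[1:]
--     while True:
--         if ok_int(left) and right[-1] != '0':
--             out.append(left + '.' + right)
--         if len(right) == 1:
--             break
--         left, right = left + right[0], right[1:]
--     return out
-- ===== Notes on version B (the rewrite author's own statement) =====
-- stated objective: alternative
-- what changed: Replaces A's five-way case analysis on the zero configuration (with an index loop over slices in one branch) by a single uniform sweep that carries the growing integer part and shrinking fraction part as explicit loop state, appending a candidate per dot placement under one validity test.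
import Mathlib
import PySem

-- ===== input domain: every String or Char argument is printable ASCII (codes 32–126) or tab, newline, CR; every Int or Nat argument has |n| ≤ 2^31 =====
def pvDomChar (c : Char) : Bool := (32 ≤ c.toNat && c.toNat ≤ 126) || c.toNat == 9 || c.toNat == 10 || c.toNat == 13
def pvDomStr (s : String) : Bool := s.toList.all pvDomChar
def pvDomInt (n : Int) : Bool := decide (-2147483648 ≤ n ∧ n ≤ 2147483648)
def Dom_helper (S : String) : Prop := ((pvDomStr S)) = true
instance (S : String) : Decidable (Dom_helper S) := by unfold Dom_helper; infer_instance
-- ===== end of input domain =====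

-- B replaces A's iterative five-way zero-configuration case analysis by a recursive descent
-- carrying the (integer part, fraction part) pair as explicit state, one uniform validity
-- test per dot placement (alternative decomposition; equal return value on Pre_).


-- ===== PORT A =====
def helper (S : String) : List String :=
  let c0? := PySem.Str.pyGet? S 0
  let cl? := PySem.Str.pyGet? S (-1)
  if 1 < PySem.Str.len S ∧ c0? = some '0' ∧ cl? = some '0' then
    []
  else if c0? = some '0' ∧ cl? ≠ some '0' then
    [PySem.Str.join "." [String.ofList [c0?.getD ' '], PySem.Str.slice S (some 1) none]]
  else if c0? ≠ some '0' ∧ cl? = some '0' then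
    [S]
  else if PySem.Str.len S = 1 then
    [S]
  else if c0? ≠ some '0' ∧ cl? ≠ some '0' then
    (PySem.List.pyRange 1 (PySem.Str.len S)).foldl
      (fun result i =>
        result ++ [PySem.Str.join "." [PySem.Str.slice S none (some i), PySem.Str.slice S (some i) none]])
      [S]
  else
    []  -- Python falls off the end (returns None); unreachable for S ≠ ""

-- ===== PORT B =====
-- B's strings are ported on the List Char side (PySem.Chars): Python '+' on str is exactly
-- List.append of the character lists, wrapped back with String.ofList. The while loop over
-- the shrinking `right` is ported as the recursion `placeLoop` on `right`.
def pvOkInt (p : List Char) : Bool :=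
  p.length == 1 || !(PySem.List.pyGet? p 0 == some '0')

def placeLoop (out : List String) (left right : List Char) : List String :=
  let out' := if pvOkInt left && !(PySem.List.pyGet? right (-1) == some '0')
              then out ++ [String.ofList (left ++ '.' :: right)] else out
  match right with
  | [] => out'          -- unreachable: Python's `right` is never empty inside the loop
  | [_] => out'
  | r0 :: rs => placeLoop out' (left ++ [r0]) rs

def helper_alt (S : String) : List String :=
  let X := S.toList
  if X.length = 1 then [S]
  else placeLoop (if pvOkInt X then [S] else []) (X.take 1) (X.drop 1)
  -- Python's S[0] (IndexError on "") is ported as X.take 1; Pre_ excludes ""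

-- ===== PRECONDITION & SPEC =====
-- Pre_ excludes only the empty string, on which Python A raises IndexError (S[0]).
def Pre_helper (S : String) : Prop := S ≠ ""
instance (S : String) : Decidable (Pre_helper S) := by unfold Pre_helper; infer_instance
def pvWitness_helper : String := "105"

def Spec_helper (S : String) (out : List String) : Prop := out = helper_alt S
instance (S : String) (out : List String) : Decidable (Spec_helper S out) := by unfold Spec_helper; infer_instance

-- ===== CLAIM (what is proved, stated in full; the proofs are below) =====
def Claim_equal_helper : Prop := ∀ (S : String), Dom_helper S → Pre_helper S → Spec_helper S (helper S)

-- ===== LEMMAS AND PROOFS =====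

-- proof-side restatement of the loop body without its accumulator
def placeB (left right : List Char) : List String :=
  let here := if pvOkInt left && !(PySem.List.pyGet? right (-1) == some '0')
              then [String.ofList (left ++ '.' :: right)] else []
  match right with
  | [] => here
  | [_] => here
  | r0 :: rs => here ++ placeB (left ++ [r0]) rs

theorem placeLoop_eq (R : List Char) : ∀ (out : List String) (L : List Char),
    placeLoop out L R = out ++ placeB L R := by
  induction R with
  | nil => intro out L; simp [placeLoop, placeB]; split <;> simp
  | cons r0 rs ih =>
    intro out L
    cases rs with
    | nil => simp [placeLoop, placeB]; split <;> simp
    | cons r1 rs' =>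
      simp only [placeLoop, placeB, ih]
      split <;> simp

-- if the fraction part always ends in '0', no placement is ever emitted
theorem place_last_zero (R : List Char) : ∀ (L : List Char), R.getLast? = some '0' →
    placeB L R = [] := by
  induction R with
  | nil => intro L hz; simp at hz
  | cons r0 rs ih =>
    intro L hz
    cases rs with
    | nil =>
      simp at hz
      simp [placeB, PySem.List.pyGet?_neg_one, hz]
    | cons r1 rs' =>
      rw [List.getLast?_cons_cons] at hz
      simp [placeB, PySem.List.pyGet?_neg_one, List.getLast?_cons_cons, hz, ih _ hz]

-- a multi-character integer part starting with '0' never validates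
theorem place_head_zero (R : List Char) : ∀ (L : List Char), L.head? = some '0' →
    2 ≤ L.length → placeB L R = [] := by
  induction R with
  | nil =>
    intro L h0 h2
    have : pvOkInt L = false := by
      unfold pvOkInt
      simp [PySem.List.pyGet?_zero, ← List.head?_eq_getElem?, h0]
      omega
    simp [placeB, this]
  | cons r0 rs ih =>
    intro L h0 h2
    have hok : pvOkInt L = false := by
      unfold pvOkInt
      simp [PySem.List.pyGet?_zero, ← List.head?_eq_getElem?, h0]
      omega
    cases rs with
    | nil => simp [placeB, hok]
    | cons r1 rs' =>
      have h0' : (L ++ [r0]).head? = some '0' := by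
        cases L with
        | nil => simp at h0
        | cons a L'' => simpa using h0
      have h2' : 2 ≤ (L ++ [r0]).length := by simp; omega
      simp [placeB, hok, ih _ h0' h2']

-- integer part "0": only the very first placement validates
theorem place_zero (d : Char) (rest' : List Char) (hz : (d :: rest').getLast? ≠ some '0') :
    placeB ['0'] (d :: rest') = [String.ofList ('0' :: '.' :: d :: rest')] := by
  cases rest' with
  | nil =>
    simp only [List.getLast?_singleton] at hz
    have hd : ¬ d = '0' := fun h => hz (by rw [h])
    simp [placeB, PySem.List.pyGet?_neg_one, pvOkInt, hd]
  | cons r1 rs =>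
    have step : placeB ['0'] (d :: r1 :: rs) =
        (if pvOkInt ['0'] && !(PySem.List.pyGet? (d :: r1 :: rs) (-1) == some '0')
         then [String.ofList (['0'] ++ '.' :: (d :: r1 :: rs))] else [])
        ++ placeB ('0' :: [d]) (r1 :: rs) := rfl
    rw [step, place_head_zero (r1 :: rs) ['0', d] rfl (by simp)]
    have hzc : (PySem.List.pyGet? (d :: r1 :: rs) (-1) == some '0') = false := by
      rw [PySem.List.pyGet?_neg_one]
      rw [List.getLast?_cons_cons] at hz
      simp [List.getLast?_cons_cons]
      simpa using hz
    simp [pvOkInt, hzc]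

-- nonzero-leading integer part, fraction never ending in '0': every placement validates
theorem place_map (S : String) (c : Char) (hc : c ≠ '0') :
    ∀ (R L' : List Char), R ≠ [] → R.getLast? ≠ some '0' →
      S.toList = (c :: L') ++ R →
      placeB (c :: L') R =
        (PySem.List.pyRange ((L'.length : Int) + 1) ((S.toList.length : Int))).map
          (fun i => PySem.Str.join "." [PySem.Str.slice S none (some i), PySem.Str.slice S (some i) none]) := by
  intro R
  induction R with
  | nil => intro L' h; simp at h
  | cons r0 rs ih =>
    intro L' _ hz hS
    have hok : pvOkInt (c :: L') = true := by
      unfold pvOkInt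
      simp [hc]
    have hlenS : S.toList.length = L'.length + 1 + (r0 :: rs).length := by
      rw [hS]; simp only [List.length_append, List.length_cons]
    have hj : ((L'.length : Int) + 1) < ((S.toList.length : Int)) := by
      rw [hlenS]; simp only [List.length_cons]; push_cast; omega
    have e : ((L'.length : Int) + 1) = (((L'.length + 1 : Nat)) : Int) := by push_cast; ring
    have h1 : (PySem.Str.slice S none (some ((L'.length : Int) + 1))).toList = c :: L' := by
      rw [e]
      simp only [PySem.Str.toList_slice, PySem.Chars.slice_eq_listSlice]
      rw [hS, PySem.List.slice_to_natCast]
      exact List.take_left' (by simp)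
    have h2 : (PySem.Str.slice S (some ((L'.length : Int) + 1)) none).toList = r0 :: rs := by
      rw [e]
      simp only [PySem.Str.toList_slice, PySem.Chars.slice_eq_listSlice]
      rw [hS, PySem.List.slice_from_natCast]
      exact List.drop_left' (by simp)
    have hf : PySem.Str.join "." [PySem.Str.slice S none (some ((L'.length : Int) + 1)),
        PySem.Str.slice S (some ((L'.length : Int) + 1)) none] =
        String.ofList ((c :: L') ++ '.' :: (r0 :: rs)) := by
      apply String.toList_inj.mp
      simp [PySem.Str.toList_join, PySem.Chars.join_cons_cons, PySem.Chars.join_singleton, h1, h2]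
    rw [PySem.List.pyRange_one_cons hj]
    cases rs with
    | nil =>
      have hb : ((S.toList.length : Int)) = (L'.length : Int) + 1 + 1 := by
        rw [hS]; simp only [List.length_append, List.length_cons, List.length_nil]
        push_cast; omega
      have hnil : PySem.List.pyRange ((L'.length : Int) + 1 + 1) ((S.toList.length : Int)) = [] := by
        rw [hb]; simp [PySem.List.pyRange]
      have hr0 : (PySem.List.pyGet? [r0] (-1) == some '0') = false := by
        rw [PySem.List.pyGet?_neg_one]
        simp only [List.getLast?_singleton] at hz ⊢
        simpa using hz
      simp only [placeB, hok, hr0, Bool.not_false, Bool.and_self, if_true,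
        List.map_cons, List.map_nil, hnil, hf]
    | cons r1 rs' =>
      have hz' : (r1 :: rs').getLast? ≠ some '0' := by
        rwa [List.getLast?_cons_cons] at hz
      have hS' : S.toList = (c :: (L' ++ [r0])) ++ (r1 :: rs') := by
        rw [hS]; simp
      have ihx := ih (L' ++ [r0]) (by simp) hz' hS'
      have hlen' : ((L' ++ [r0]).length : Int) + 1 = (L'.length : Int) + 1 + 1 := by
        simp
      rw [hlen'] at ihx
      have hzc : (PySem.List.pyGet? (r0 :: r1 :: rs') (-1) == some '0') = false := by
        rw [PySem.List.pyGet?_neg_one, List.getLast?_cons_cons]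
        simpa using hz'
      have step : placeB (c :: L') (r0 :: r1 :: rs') =
          (if pvOkInt (c :: L') && !(PySem.List.pyGet? (r0 :: r1 :: rs') (-1) == some '0')
           then [String.ofList ((c :: L') ++ '.' :: (r0 :: r1 :: rs'))] else [])
          ++ placeB (c :: (L' ++ [r0])) (r1 :: rs') := rfl
      rw [step, hok, hzc]
      simp only [Bool.not_false, Bool.and_self, if_true, List.map_cons]
      rw [ihx, hf, List.singleton_append]

-- ===== VERDICT (by name: the statement is the Claim_ definition above) =====
theorem helper_spec : Claim_equal_helper := by
  intro S _ hpre
  show helper S = helper_alt S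
  have hne : S.toList ≠ [] := by
    intro h; apply hpre; exact String.toList_inj.mp (by simpa using h)
  obtain ⟨c, rest, hL⟩ := List.exists_cons_of_ne_nil hne
  have h0 : PySem.Str.pyGet? S 0 = some c := by simp [hL]
  have hlast : PySem.Str.pyGet? S (-1) = (c :: rest).getLast? := by
    simp [PySem.List.pyGet?_neg_one, hL]
  have hlen : PySem.Str.len S = ((rest.length : Int) + 1) := by simp [hL]
  cases rest with
  | nil =>
    have halt : helper_alt S = [S] := by simp [helper_alt, hL]
    rw [halt]
    by_cases hc : c = '0' <;>
      simp [helper, hL, hc, PySem.List.pyGet?_neg_one]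
  | cons d rest' =>
    have hne1 : ¬ S.toList.length = 1 := by rw [hL]; simp
    have halt : helper_alt S =
        (if pvOkInt (c :: d :: rest') then [S] else []) ++ placeB [c] (d :: rest') := by
      simp [helper_alt, hL, placeLoop_eq]
    have hlast2 : PySem.Str.pyGet? S (-1) = (d :: rest').getLast? := by
      rw [hlast, List.getLast?_cons_cons]
    have hlt1 : 1 < PySem.Str.len S := by
      rw [hlen]; simp only [List.length_cons]; push_cast; omega
    have hne1' : ¬ PySem.Str.len S = 1 := by
      rw [hlen]; simp only [List.length_cons]; push_cast; omega
    by_cases hc : c = '0' <;> by_cases hz : (d :: rest').getLast? = some '0'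
    · -- A: [] ; B: [] ++ []
      have hA : helper S = [] := by
        simp only [helper]
        rw [if_pos ⟨hlt1, by rw [h0, hc], by rw [hlast2, hz]⟩]
      have hok : pvOkInt (c :: d :: rest') = false := by
        simp [pvOkInt, hc]
      rw [hA, halt, hok, place_last_zero _ _ hz]
      simp
    · -- A: ["0.rest"] ; B: [] ++ [that]
      have hA : helper S =
          [PySem.Str.join "." [String.ofList ['0'], PySem.Str.slice S (some 1) none]] := by
        simp only [helper]
        rw [if_neg (fun h => hz (by rw [← hlast2, h.2.2])),
            if_pos ⟨by rw [h0, hc], by rw [hlast2]; exact fun h => hz h⟩]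
        rw [h0, hc]
        rfl
      have hok : pvOkInt (c :: d :: rest') = false := by
        simp [pvOkInt, hc]
      have hAval : PySem.Str.join "." [String.ofList ['0'], PySem.Str.slice S (some 1) none] =
          String.ofList ('0' :: '.' :: d :: rest') := by
        apply String.toList_inj.mp
        have ht : (PySem.Str.slice S (some 1) none).toList = d :: rest' := by
          simp only [PySem.Str.toList_slice, PySem.Chars.slice_eq_listSlice]
          rw [show ((1 : Int)) = (((1 : Nat)) : Int) by norm_num, PySem.List.slice_from_natCast]
          simp [hL]
        simp [PySem.Str.toList_join, PySem.Chars.join_cons_cons, PySem.Chars.join_singleton, ht]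
      rw [hA, halt, hok, hAval]
      rw [hc] at *
      rw [place_zero d rest' hz]
      simp
    · -- A: [S] ; B: [S] ++ []
      have hA : helper S = [S] := by
        simp only [helper]
        rw [if_neg (fun h => hc (by injection (h0 ▸ h.2.1))),
            if_neg (fun h => hc (by injection (h0 ▸ h.1))),
            if_pos ⟨by rw [h0]; simp [hc], by rw [hlast2, hz]⟩]
      have hok : pvOkInt (c :: d :: rest') = true := by
        simp [pvOkInt, hc]
      rw [hA, halt, hok, place_last_zero _ _ hz]
      simp
    · -- A: [S] ++ all splits ; B: [S] ++ all splits
      have hA : helper S = (PySem.List.pyRange 1 (PySem.Str.len S)).foldl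
          (fun result i =>
            result ++ [PySem.Str.join "." [PySem.Str.slice S none (some i), PySem.Str.slice S (some i) none]])
          [S] := by
        simp only [helper]
        rw [if_neg (fun h => hc (by injection (h0 ▸ h.2.1))),
            if_neg (fun h => hc (by injection (h0 ▸ h.1))),
            if_neg (fun h => hz (by rw [← hlast2, h.2])),
            if_neg hne1',
            if_pos ⟨by rw [h0]; simp [hc], by rw [hlast2]; exact fun h => hz h⟩]
      have hok : pvOkInt (c :: d :: rest') = true := by
        simp [pvOkInt, hc]
      have hpm := place_map S c hc (d :: rest') [] (by simp) hz (by simpa using hL)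
      have hr : PySem.List.pyRange 1 (PySem.Str.len S) =
          PySem.List.pyRange ((([] : List Char).length : Int) + 1) ((S.toList.length : Int)) := by
        simp
      rw [hA, halt, hok, PySem.List.foldl_append_singleton_eq_map, hpm, hr]
      simp
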